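-- pv_equiv track=rewrite | github.com/alphadl/cc-agent | src/tools_impl/patch.py | _split_multi_file_diff
-- ===== SOURCE A (Python) =====
-- def _strip_ab(path: str) -> str:
--     p = path.strip()
--     if p.startswith("a/") or p.startswith("b/"):
--         return p[2:]
--     return p
--
-- def _split_multi_file_diff(diff: str) -> list[tuple[str | None, str, str | None]]:
--     """Split a possibly-multi-file diff into chunks.
--
--     Returns list of (path_from_header, chunk_text, error).
--     """
--     lines = diff.splitlines(keepends=False)
--     chunks: list[list[str]] = []
--     current: list[str] = []
--
--     for line in lines:
--         if line.startswith("diff --git "):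
--             if current:
--                 chunks.append(current)
--                 current = []
--         current.append(line)
--     if current:
--         chunks.append(current)
--
--     # If no diff headers, treat entire input as one chunk
--     if len(chunks) == 1 and not (chunks[0] and chunks[0][0].startswith("diff --git ")):
--         return [(None, diff, None)]
--
--     out: list[tuple[str | None, str, str | None]] = []
--     for ch in chunks:
--         header_path: str | None = None
--         if ch and ch[0].startswith("diff --git "):
--             parts = ch[0].split()
--             if len(parts) >= 4:
--                 # "diff --git a/x b/y" — prefer b/ path
--                 header_path = _strip_ab(parts[3])
--         out.append((header_path, "\n".join(ch) + "\n", None))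
--     return out
-- ===== SOURCE B (Python) =====
-- def _strip_ab(path: str) -> str:
--     p = path.strip()
--     if p.startswith("a/") or p.startswith("b/"):
--         return p[2:]
--     return p
--
-- def _split_multi_file_diff(diff: str) -> list[tuple[str | None, str, str | None]]:
--     """Split a possibly-multi-file diff into chunks (two-pointer slice scan)."""
--     hdr = "diff --git "
--     lines = diff.splitlines(keepends=False)
--     n = len(lines)
--     chunks: list[list[str]] = []
--     i = 0
--     while i < n:
--         j = i + 1
--         while j < n and not lines[j].startswith(hdr):
--             j += 1
--         chunks.append(lines[i:j])
--         i = j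
--
--     if len(chunks) == 1 and not chunks[0][0].startswith(hdr):
--         return [(None, diff, None)]
--
--     out: list[tuple[str | None, str, str | None]] = []
--     for ch in chunks:
--         header_path: str | None = None
--         if ch[0].startswith(hdr):
--             parts = ch[0].split()
--             if len(parts) >= 4:
--                 header_path = _strip_ab(parts[3])
--         out.append((header_path, "\n".join(ch) + "\n", None))
--     return out
-- ===== Notes on version B (the rewrite author's own statement) =====
-- stated objective: alternative
-- what changed: Replaces A's single pass with a mutable current-chunk buffer flushed at each diff header line by a two-pointer scan that finds the next header position and slices the line list between consecutive headers; the final per-chunk output pass is kept.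
import Mathlib
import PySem

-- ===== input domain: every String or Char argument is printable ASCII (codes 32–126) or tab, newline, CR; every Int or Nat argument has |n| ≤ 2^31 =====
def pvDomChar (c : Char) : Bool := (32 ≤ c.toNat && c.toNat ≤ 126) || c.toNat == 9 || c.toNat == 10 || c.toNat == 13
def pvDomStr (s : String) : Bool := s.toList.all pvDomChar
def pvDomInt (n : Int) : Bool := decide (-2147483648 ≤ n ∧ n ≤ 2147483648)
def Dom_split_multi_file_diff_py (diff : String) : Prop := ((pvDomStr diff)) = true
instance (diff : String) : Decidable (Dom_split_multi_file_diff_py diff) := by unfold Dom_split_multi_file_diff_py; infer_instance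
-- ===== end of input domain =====

-- B replaces A's mutable flush-on-header accumulator with a two-pointer scan that slices
-- the line list between consecutive headers (objective: alternative decomposition, same cost).

-- shared module helper _strip_ab (used by both A and B)
def stripAbPy (path : String) : String :=
  let p := PySem.Str.strip path
  if PySem.Str.startswith p "a/" || PySem.Str.startswith p "b/" then
    PySem.Str.slice p (some 2) none
  else p

-- ===== PORT A =====
def split_multi_file_diff_py (diff : String) : List (Option String × String × Option String) :=
  let lines := PySem.Str.splitlines diff
  let st := lines.foldl
    (fun (st : List (List String) × List String) line =>
      let st :=
        if PySem.Str.startswith line "diff --git " then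
          (if st.2 ≠ [] then (st.1 ++ [st.2], ([] : List String)) else st)
        else st
      (st.1, st.2 ++ [line]))
    ([], [])
  let chunks := if st.2 ≠ [] then st.1 ++ [st.2] else st.1
  if chunks.length == 1 &&
      !(match chunks.headD [] with
        | [] => false
        | l :: _ => PySem.Str.startswith l "diff --git ") then
    [(none, diff, none)]
  else
    chunks.map (fun ch =>
      let header_path : Option String :=
        match ch with
        | [] => none
        | l :: _ =>
          if PySem.Str.startswith l "diff --git " then
            let parts := PySem.Str.split₀ l
            if 4 ≤ parts.length then some (stripAbPy (parts.getD 3 "")) else none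
          else none
      (header_path, PySem.Str.join "\n" ch ++ "\n", none))

-- ===== PORT B =====
-- inner while: advance j past non-header lines
def bScanJ (lines : List String) (n j : Nat) : Nat :=
  if _h : j < n ∧ ¬ (PySem.Str.startswith (lines.getD j "") "diff --git " = true) then
    bScanJ lines n (j + 1)
  else j
termination_by n - j
decreasing_by omega

-- needed by bChunks's termination argument
theorem bScanJ_ge (lines : List String) (n j : Nat) : j ≤ bScanJ lines n j := by
  rw [bScanJ]
  split
  · exact le_trans (by omega) (bScanJ_ge lines n (j + 1))
  · exact Nat.le_refl j
termination_by n - j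
decreasing_by omega

-- outer while: collect slices between consecutive headers
def bChunks (lines : List String) (n i : Nat) (acc : List (List String)) :
    List (List String) :=
  if h : i < n then
    let j := bScanJ lines n (i + 1)
    bChunks lines n j (acc ++ [PySem.List.slice lines (some (i : Int)) (some (j : Int))])
  else acc
termination_by n - i
decreasing_by
  have := bScanJ_ge lines n (i + 1)
  omega

def split_multi_file_diff_py_alt (diff : String) : List (Option String × String × Option String) :=
  let lines := PySem.Str.splitlines diff
  let chunks := bChunks lines lines.length 0 []
  if chunks.length == 1 &&
      !(PySem.Str.startswith ((chunks.headD []).headD "") "diff --git ") then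
    [(none, diff, none)]
  else
    chunks.map (fun ch =>
      let header_path : Option String :=
        match ch with
        | [] => none
        | l :: _ =>
          if PySem.Str.startswith l "diff --git " then
            let parts := PySem.Str.split₀ l
            if 4 ≤ parts.length then some (stripAbPy (parts.getD 3 "")) else none
          else none
      (header_path, PySem.Str.join "\n" ch ++ "\n", none))

-- ===== PRECONDITION & SPEC =====
def Spec_split_multi_file_diff_py (diff : String) (out : List (Option String × String × Option String)) : Prop := out = split_multi_file_diff_py_alt diff
instance (diff : String) (out : List (Option String × String × Option String)) : Decidable (Spec_split_multi_file_diff_py diff out) := by unfold Spec_split_multi_file_diff_py; infer_instance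

-- ===== CLAIM (what is proved, stated in full; the proofs are below) =====
def Claim_equal_split_multi_file_diff_py : Prop := ∀ (diff : String), Dom_split_multi_file_diff_py diff → Spec_split_multi_file_diff_py diff (split_multi_file_diff_py diff)

-- ===== LEMMAS AND PROOFS =====

def notHdr (x : String) : Bool := !(PySem.Str.startswith x "diff --git ")

-- common characterization: chunks break exactly before each header line (except index 0)
def chunkSpec : List String → List (List String)
  | [] => []
  | l :: ls => (l :: ls.takeWhile notHdr) :: chunkSpec (ls.dropWhile notHdr)
termination_by ls => ls.length
decreasing_by
  have := List.length_dropWhile_le notHdr ls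
  simpa using Nat.lt_succ_of_le this

theorem chunkSpec_mem_ne_nil (lines : List String) :
    ∀ c ∈ chunkSpec lines, c ≠ [] := by
  induction lines using chunkSpec.induct with
  | case1 => simp [chunkSpec]
  | case2 l ls ih =>
    intro c hc
    rw [chunkSpec] at hc
    rcases List.mem_cons.1 hc with rfl | hc'
    · simp
    · exact ih c hc'

-- A's loop body, named (definitionally equal to the lambda in the port)
def stepA (st : List (List String) × List String) (line : String) :
    List (List String) × List String :=
  let st :=
    if PySem.Str.startswith line "diff --git " then
      (if st.2 ≠ [] then (st.1 ++ [st.2], ([] : List String)) else st)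
    else st
  (st.1, st.2 ++ [line])

theorem foldA_named (lines : List String) : ∀ (cs : List (List String)) (cur : List String),
    (let st := List.foldl stepA (cs, cur) lines
     if st.2 ≠ [] then st.1 ++ [st.2] else st.1)
    = cs ++ (if cur = [] then chunkSpec lines
             else (cur ++ lines.takeWhile notHdr) :: chunkSpec (lines.dropWhile notHdr)) := by
  induction lines with
  | nil =>
    intro cs cur
    by_cases h : cur = [] <;> simp [h, chunkSpec]
  | cons l ls ih =>
    intro cs cur
    show (let st := List.foldl stepA (stepA (cs, cur) l) ls
          if st.2 ≠ [] then st.1 ++ [st.2] else st.1) = _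
    by_cases hl : PySem.Str.startswith l "diff --git " = true
    · have hnh : notHdr l = false := by simp only [notHdr, hl, Bool.not_true]
      by_cases h : cur = []
      · rw [show stepA (cs, cur) l = (cs, [l]) by unfold stepA; rw [if_pos hl]; simp [h]]
        rw [ih cs [l]]
        simp [h, chunkSpec]
      · rw [show stepA (cs, cur) l = (cs ++ [cur], [l]) by
          unfold stepA; rw [if_pos hl]; simp [h]]
        rw [ih (cs ++ [cur]) [l]]
        simp [h, chunkSpec, hnh]
    · have hlf : PySem.Str.startswith l "diff --git " = false := by
        revert hl; cases PySem.Str.startswith l "diff --git " <;> simp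
      have hnh : notHdr l = true := by simp only [notHdr, hlf, Bool.not_false]
      rw [show stepA (cs, cur) l = (cs, cur ++ [l]) by unfold stepA; rw [if_neg hl]]
      rw [ih cs (cur ++ [l])]
      by_cases h : cur = []
      · simp [h, chunkSpec]
      · simp [h, List.takeWhile_cons, List.dropWhile_cons, hnh]

-- the same statement with the port's inline lambda (definitionally equal)
theorem foldA (lines : List String) (cs : List (List String)) (cur : List String) :
    (let st := lines.foldl
      (fun (st : List (List String) × List String) line =>
        let st :=
          if PySem.Str.startswith line "diff --git " then
            (if st.2 ≠ [] then (st.1 ++ [st.2], ([] : List String)) else st)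
          else st
        (st.1, st.2 ++ [line])) (cs, cur)
     if st.2 ≠ [] then st.1 ++ [st.2] else st.1)
    = cs ++ (if cur = [] then chunkSpec lines
             else (cur ++ lines.takeWhile notHdr) :: chunkSpec (lines.dropWhile notHdr)) :=
  foldA_named lines cs cur

theorem take_length_takeWhile {α : Type} (p : α → Bool) (l : List α) :
    l.take (l.takeWhile p).length = l.takeWhile p := by
  induction l with
  | nil => simp
  | cons a t ih =>
    by_cases h : p a <;> simp [h, ih]

theorem drop_length_takeWhile {α : Type} (p : α → Bool) (l : List α) :
    l.drop (l.takeWhile p).length = l.dropWhile p := by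
  induction l with
  | nil => simp
  | cons a t ih =>
    by_cases h : p a <;> simp [h, ih]

theorem bScanJ_eq (lines : List String) (j : Nat) :
    bScanJ lines lines.length j = j + ((lines.drop j).takeWhile notHdr).length := by
  rw [bScanJ]
  split
  · rename_i h
    obtain ⟨hj, hh⟩ := h
    have hdrop : lines.drop j = lines[j] :: lines.drop (j + 1) :=
      List.drop_eq_getElem_cons hj
    have hget : lines.getD j "" = lines[j] := List.getD_eq_getElem lines "" hj
    rw [bScanJ_eq lines (j + 1), hdrop, List.takeWhile_cons]
    rw [hget] at hh
    have hlf : PySem.Str.startswith lines[j] "diff --git " = false := by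
      revert hh; cases PySem.Str.startswith lines[j] "diff --git " <;> simp
    have hnh : notHdr lines[j] = true := by simp only [notHdr, hlf, Bool.not_false]
    simp [hnh]; omega
  · rename_i h
    by_cases hj : j < lines.length
    · have hh : PySem.Str.startswith (lines.getD j "") "diff --git " = true := by
        by_contra hc; exact h ⟨hj, hc⟩
      have hdrop : lines.drop j = lines[j] :: lines.drop (j + 1) :=
        List.drop_eq_getElem_cons hj
      have hget : lines.getD j "" = lines[j] := List.getD_eq_getElem lines "" hj
      rw [hget] at hh
      have hnh : notHdr lines[j] = false := by simp only [notHdr, hh, Bool.not_true]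
      rw [hdrop, List.takeWhile_cons]
      simp [hnh]
    · have hnil : lines.drop j = [] := List.drop_eq_nil_of_le (by omega)
      simp [hnil]
termination_by lines.length - j
decreasing_by omega

theorem bChunks_eq (lines : List String) (i : Nat) (acc : List (List String)) :
    bChunks lines lines.length i acc = acc ++ chunkSpec (lines.drop i) := by
  rw [bChunks]
  split
  · rename_i hi
    have hj : bScanJ lines lines.length (i + 1)
        = (i + 1) + ((lines.drop (i + 1)).takeWhile notHdr).length := bScanJ_eq lines (i + 1)
    rw [bChunks_eq lines (bScanJ lines lines.length (i + 1)) _]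
    have hdropi : lines.drop i = lines[i] :: lines.drop (i + 1) :=
      List.drop_eq_getElem_cons hi
    have hslice : PySem.List.slice lines (some (i : Int))
        (some ((bScanJ lines lines.length (i + 1) : Nat) : Int))
        = lines[i] :: (lines.drop (i + 1)).takeWhile notHdr := by
      rw [PySem.List.slice_natCast, hj, hdropi]
      have hsub : (i + 1) + ((lines.drop (i + 1)).takeWhile notHdr).length - i
          = ((lines.drop (i + 1)).takeWhile notHdr).length + 1 := by omega
      rw [hsub, List.take_succ_cons, take_length_takeWhile]
    have hdropj : lines.drop (bScanJ lines lines.length (i + 1))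
        = (lines.drop (i + 1)).dropWhile notHdr := by
      rw [hj, ← List.drop_drop, drop_length_takeWhile]
    rw [hslice, hdropj]
    rw [show chunkSpec (lines.drop i)
        = (lines[i] :: (lines.drop (i + 1)).takeWhile notHdr) ::
            chunkSpec ((lines.drop (i + 1)).dropWhile notHdr) by rw [hdropi, chunkSpec]]
    simp [List.append_assoc]
  · rename_i hi
    have hnil : lines.drop i = [] := List.drop_eq_nil_of_le (by omega)
    simp [hnil, chunkSpec]
termination_by lines.length - i
decreasing_by
  have := bScanJ_ge lines lines.length (i + 1)
  omega

-- ===== VERDICT (by name: the statement is the Claim_ definition above) =====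
theorem split_multi_file_diff_py_spec : Claim_equal_split_multi_file_diff_py := by
  unfold Claim_equal_split_multi_file_diff_py
  intro diff _
  unfold Spec_split_multi_file_diff_py
  unfold split_multi_file_diff_py split_multi_file_diff_py_alt
  set lines := PySem.Str.splitlines diff with hl
  have hA := foldA lines [] []
  simp only [reduceIte, List.nil_append] at hA
  have hB := bChunks_eq lines 0 []
  simp only [List.drop_zero, List.nil_append] at hB
  simp only [hA, hB]
  cases hc : chunkSpec lines with
  | nil => simp
  | cons c t =>
    cases t with
    | nil =>
      have hcne : c ≠ [] := chunkSpec_mem_ne_nil lines c (by rw [hc]; simp)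
      obtain ⟨x, xs, hx⟩ := List.exists_cons_of_ne_nil hcne
      subst hx
      simp
    | cons c2 t2 => simp
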